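-- pv_equiv track=rewrite | github.com/ricktoews/streamlit-lab | calc_month.py | get_12_digit_calendar
-- ===== SOURCE A (Python) =====
-- def parse_year(year):
--     century = year // 100
--     short_year = year % 100
--     return [century, short_year]
--
-- def calc_julian_year(year):
--     [century, short_year] = parse_year(year)
--
--     leap_days = short_year // 4
--     if short_year % 4 != 0:
--         leap_days += 1
--
--     offset_days = short_year + leap_days
--
--     century_jan = 18 - century
--     jan = century_jan + offset_days
--     return jan % 7
--
-- gregorian_centuries = [6, 5, 3, 1]
--
-- def calc_gregorian_year(year):
--     [century, short_year] = parse_year(year)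
--     century_jan = gregorian_centuries[century % 4]
--
--     leap_days = short_year // 4
--     if short_year > 0:
--         if short_year % 4 == 0:
--             leap_days -= 1
--         if century % 4 == 0:
--             leap_days += 1
--
--     offset_days = short_year + leap_days
--
--     jan = century_jan + offset_days
--     return jan % 7
--
-- YEAR_TEMPLATE = [0, 3, 3, 6, 1, 4, 6, 2, 5, 0, 3, 5]
--
-- def leap_day(year):
--     if year % 400 == 0:
--         return 1
--
--     if year < 1600 and year % 4 == 0:
--         return 1
--
--     if year % 4 == 0 and year % 100 != 0:
--         return 1
--
--     return 0
--
-- def get_12_digit_calendar(year):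
--     jan = 0
--     if year < 1582:
--         jan = calc_julian_year(year)
--     elif year > 1582:
--         jan = calc_gregorian_year(year)
--
--     leap_offset = leap_day(year)
--     adjusted_template = [x + leap_offset if 3 <= i + 1 <= 12 else x for i, x in enumerate(YEAR_TEMPLATE)]
--     calendar_12_digit = [(x + jan) % 7 for x in adjusted_template]
--
--     return calendar_12_digit
-- ===== SOURCE B (Python) =====
-- def parse_year(year):
--     century = year // 100
--     short_year = year % 100
--     return [century, short_year]
--
-- def calc_julian_year(year):
--     [century, short_year] = parse_year(year)
--     leap_days = short_year // 4
--     if short_year % 4 != 0: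
--         leap_days += 1
--     offset_days = short_year + leap_days
--     century_jan = 18 - century
--     jan = century_jan + offset_days
--     return jan % 7
--
-- gregorian_centuries = [6, 5, 3, 1]
--
-- def calc_gregorian_year(year):
--     [century, short_year] = parse_year(year)
--     century_jan = gregorian_centuries[century % 4]
--     leap_days = short_year // 4
--     if short_year > 0:
--         if short_year % 4 == 0:
--             leap_days -= 1
--         if century % 4 == 0:
--             leap_days += 1
--     offset_days = short_year + leap_days
--     jan = century_jan + offset_days
--     return jan % 7
--
-- def leap_day(year):
--     if year % 400 == 0:
--         return 1
--     if year < 1600 and year % 4 == 0: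
--         return 1
--     if year % 4 == 0 and year % 100 != 0:
--         return 1
--     return 0
--
-- def get_12_digit_calendar(year):
--     jan = 0
--     if year < 1582:
--         jan = calc_julian_year(year)
--     elif year > 1582:
--         jan = calc_gregorian_year(year)
--     days = [31, 28 + leap_day(year), 31, 30, 31, 30, 31, 31, 30, 31, 30, 31]
--     result = []
--     offset = jan
--     for d in days:
--         result.append(offset % 7)
--         offset += d
--     return result
-- ===== Notes on version B (the rewrite author's own statement) =====
-- stated objective: alternative
-- what changed: B drops the precomputed YEAR_TEMPLATE magic table and its two comprehensions, instead deriving the twelve first-of-month offsets in one accumulating pass over the month-length list (February's length gets the leap day added), appending offset mod seven and then adding each month's length; the jan-offset helpers are kept as-is.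
import Mathlib
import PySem

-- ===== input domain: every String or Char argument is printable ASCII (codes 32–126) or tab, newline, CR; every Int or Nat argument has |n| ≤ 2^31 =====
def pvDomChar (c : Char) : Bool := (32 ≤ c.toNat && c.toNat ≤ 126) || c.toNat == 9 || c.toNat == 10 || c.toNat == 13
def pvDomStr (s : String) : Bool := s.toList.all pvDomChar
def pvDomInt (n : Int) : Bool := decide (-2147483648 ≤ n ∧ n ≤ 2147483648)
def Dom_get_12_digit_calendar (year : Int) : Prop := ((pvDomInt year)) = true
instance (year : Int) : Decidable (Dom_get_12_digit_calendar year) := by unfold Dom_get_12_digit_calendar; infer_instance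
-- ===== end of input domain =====

-- B replaces A's precomputed YEAR_TEMPLATE and its two list comprehensions by one
-- accumulating loop over the month lengths, February including the leap day (objective: alternative decomposition, same cost).
-- Both ports share the jan-offset helpers (parse_year/calc_julian_year/calc_gregorian_year/leap_day),
-- which A and B use identically.

-- ===== shared helpers (used verbatim by both Pythons) =====
def parse_year (year : Int) : Int × Int :=
  (PySem.Int.floordiv year 100, PySem.Int.mod year 100)

def calc_julian_year (year : Int) : Int :=
  let (century, short_year) := parse_year year
  let leap_days := PySem.Int.floordiv short_year 4
  let leap_days := if PySem.Int.mod short_year 4 ≠ 0 then leap_days + 1 else leap_days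
  let offset_days := short_year + leap_days
  let century_jan := 18 - century
  let jan := century_jan + offset_days
  PySem.Int.mod jan 7

def gregorian_centuries : List Int := [6, 5, 3, 1]

-- index is 'century % 4' ∈ [0,4), always in range, so the getD 0 default is never used
def calc_gregorian_year (year : Int) : Int :=
  let (century, short_year) := parse_year year
  let century_jan := (PySem.List.pyGet? gregorian_centuries (PySem.Int.mod century 4)).getD 0
  let leap_days := PySem.Int.floordiv short_year 4
  let leap_days :=
    if short_year > 0 then
      let leap_days := if PySem.Int.mod short_year 4 = 0 then leap_days - 1 else leap_days
      if PySem.Int.mod century 4 = 0 then leap_days + 1 else leap_days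
    else leap_days
  let offset_days := short_year + leap_days
  let jan := century_jan + offset_days
  PySem.Int.mod jan 7

def leap_day (year : Int) : Int :=
  if PySem.Int.mod year 400 = 0 then 1
  else if year < 1600 ∧ PySem.Int.mod year 4 = 0 then 1
  else if PySem.Int.mod year 4 = 0 ∧ PySem.Int.mod year 100 ≠ 0 then 1
  else 0

-- ===== PORT A =====
def YEAR_TEMPLATE : List Int := [0, 3, 3, 6, 1, 4, 6, 2, 5, 0, 3, 5]

def get_12_digit_calendar (year : Int) : List Int :=
  let jan : Int :=
    if year < 1582 then calc_julian_year year
    else if year > 1582 then calc_gregorian_year year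
    else 0
  let leap_offset := leap_day year
  let adjusted_template :=
    (PySem.List.enumerate YEAR_TEMPLATE).map
      (fun ix => if 3 ≤ ix.1 + 1 ∧ ix.1 + 1 ≤ 12 then ix.2 + leap_offset else ix.2)
  adjusted_template.map (fun x => PySem.Int.mod (x + jan) 7)

-- ===== PORT B =====
def get_12_digit_calendar_alt (year : Int) : List Int :=
  let jan : Int :=
    if year < 1582 then calc_julian_year year
    else if year > 1582 then calc_gregorian_year year
    else 0
  let days : List Int := [31, 28 + leap_day year, 31, 30, 31, 30, 31, 31, 30, 31, 30, 31]
  let st := days.foldl (fun (st : List Int × Int) d =>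
      (st.1 ++ [PySem.Int.mod st.2 7], st.2 + d)) ([], jan)
  st.1

-- ===== PRECONDITION & SPEC =====
def Spec_get_12_digit_calendar (year : Int) (out : List Int) : Prop := out = get_12_digit_calendar_alt year
instance (year : Int) (out : List Int) : Decidable (Spec_get_12_digit_calendar year out) := by unfold Spec_get_12_digit_calendar; infer_instance

-- ===== CLAIM (what is proved, stated in full; the proofs are below) =====
def Claim_equal_get_12_digit_calendar : Prop := ∀ (year : Int), Dom_get_12_digit_calendar year → Spec_get_12_digit_calendar year (get_12_digit_calendar year)

-- ===== LEMMAS AND PROOFS =====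

-- both tails are functions of the jan offset and the leap day only
theorem tails_eq (j l : Int) :
    ((PySem.List.enumerate YEAR_TEMPLATE).map
      (fun ix => if 3 ≤ ix.1 + 1 ∧ ix.1 + 1 ≤ 12 then ix.2 + l else ix.2)).map
        (fun x => PySem.Int.mod (x + j) 7) =
    (([31, 28 + l, 31, 30, 31, 30, 31, 31, 30, 31, 30, 31] : List Int).foldl (fun (st : List Int × Int) d =>
      (st.1 ++ [PySem.Int.mod st.2 7], st.2 + d)) ([], j)).1 := by
  have h7 : (0:Int) < 7 := by norm_num
  simp only [YEAR_TEMPLATE, PySem.List.enumerate_cons, PySem.List.enumerate_nil,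
    List.foldl, List.map, List.cons_append, List.nil_append,
    PySem.Int.mod_eq_emod_of_pos h7]
  norm_num
  omega

-- ===== VERDICT (by name: the statement is the Claim_ definition above) =====
theorem get_12_digit_calendar_spec : Claim_equal_get_12_digit_calendar := by
  intro year _
  unfold Spec_get_12_digit_calendar get_12_digit_calendar get_12_digit_calendar_alt
  exact tails_eq _ _
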